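-- pv_equiv track=rewrite | github.com/mumitrol16666-creator/dLYAgpt | bot/services/ranks.py | get_rank_by_points
-- ===== SOURCE A (Python) =====
-- from typing import Optional, Tuple, List
--
-- RANKS: List[tuple[int, str]] = [
--     (0,    "Новичок"),
--     (200,  "Ученик I"),
--     (500,  "Ученик II"),
--     (1000, "Продолжающий"),
--     (1500, "Уверенный"),
--     (2200, "Опытный"),
--     (3000, "Наставник"),
--     (4500, "Маэстро"),       # по твоим правилам: 4500+
--     (6000, "Архимаэстро"),   # топ: 6000+
-- ]
--
-- def get_rank_by_points(total: int) -> tuple[str, Optional[int]]: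
--     """
--     По сумме баллов возвращает (название_ранга, следующий_порог_или_None).
--     Пример: (\"Ученик II\", 1000) — значит до следующего ранга осталось (1000 - total).
--     """
--     current_thr, current_name = RANKS[0]
--     for thr, name in RANKS:
--         if total >= thr:
--             current_thr, current_name = thr, name
--         else:
--             break
--
--     next_thr: Optional[int] = None
--     for thr, _ in RANKS:
--         if thr > current_thr:
--             next_thr = thr
--             break
--
--     return current_name, next_thr
-- ===== SOURCE B (Python) =====
-- from bisect import bisect_right
-- from typing import Optional, Tuple, List
--
-- RANKS: List[tuple[int, str]] = [
--     (0,    "Новичок"),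
--     (200,  "Ученик I"),
--     (500,  "Ученик II"),
--     (1000, "Продолжающий"),
--     (1500, "Уверенный"),
--     (2200, "Опытный"),
--     (3000, "Наставник"),
--     (4500, "Маэстро"),
--     (6000, "Архимаэстро"),
-- ]
--
-- _THRESHOLDS = [thr for thr, _ in RANKS]
--
-- def get_rank_by_points(total: int) -> tuple[str, Optional[int]]:
--     idx = bisect_right(_THRESHOLDS, total)
--     cur = max(idx - 1, 0)
--     name = RANKS[cur][1]
--     next_thr = _THRESHOLDS[cur + 1] if cur + 1 < len(RANKS) else None
--     return name, next_thr
-- ===== Notes on version B (the rewrite author's own statement) =====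
-- stated objective: idiomatic
-- what changed: Replaces A's two linear scans over RANKS by one binary search (bisect_right) over a precomputed threshold list, with the next threshold read off by index.
import Mathlib
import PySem

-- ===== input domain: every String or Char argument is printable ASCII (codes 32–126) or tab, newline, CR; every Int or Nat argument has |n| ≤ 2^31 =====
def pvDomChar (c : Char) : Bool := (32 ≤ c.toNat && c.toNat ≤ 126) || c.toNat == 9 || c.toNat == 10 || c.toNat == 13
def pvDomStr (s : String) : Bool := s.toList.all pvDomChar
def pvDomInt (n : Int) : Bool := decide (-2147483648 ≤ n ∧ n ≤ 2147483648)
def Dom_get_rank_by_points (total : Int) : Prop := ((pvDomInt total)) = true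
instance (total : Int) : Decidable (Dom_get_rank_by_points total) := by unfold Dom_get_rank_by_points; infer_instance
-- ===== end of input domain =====

-- B replaces A's two linear scans by one bisect_right over the precomputed thresholds (idiomatic).

-- ===== PORT A =====
def RANKS : List (Int × String) :=
  [(0, "Новичок"), (200, "Ученик I"), (500, "Ученик II"), (1000, "Продолжающий"),
   (1500, "Уверенный"), (2200, "Опытный"), (3000, "Наставник"), (4500, "Маэстро"),
   (6000, "Архимаэстро")]

-- first loop of A: update (current_thr, current_name) while total ≥ thr, break otherwise
def rankLoopA : List (Int × String) → Int → Int × String → Int × String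
  | [], _, cur => cur
  | (thr, name) :: rest, total, cur =>
      if total ≥ thr then rankLoopA rest total (thr, name) else cur

-- second loop of A: first threshold strictly above current_thr
def nextThrLoopA : List (Int × String) → Int → Option Int
  | [], _ => none
  | (thr, _) :: rest, cur => if thr > cur then some thr else nextThrLoopA rest cur

def get_rank_by_points (total : Int) : String × Option Int :=
  let cur := rankLoopA RANKS total (RANKS.headD (0, ""))
  (cur.2, nextThrLoopA RANKS cur.1)

-- ===== PORT B =====
def THRESHOLDS : List Int := RANKS.map Prod.fst

-- bisect_right on a sorted list = number of leading elements ≤ total (exact for sorted THRESHOLDS)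
def bisectRight : List Int → Int → Nat
  | [], _ => 0
  | t :: rest, total => if t ≤ total then 1 + bisectRight rest total else 0

def get_rank_by_points_alt (total : Int) : String × Option Int :=
  let idx : Nat := bisectRight THRESHOLDS total
  let cur : Nat := max (idx - 1) 0
  let name := (RANKS.getD cur (0, "")).2
  let next_thr : Option Int := if cur + 1 < RANKS.length then THRESHOLDS.getD (cur + 1) 0 else none
  (name, next_thr)

-- ===== PRECONDITION & SPEC =====
def Spec_get_rank_by_points (total : Int) (out : String × Option Int) : Prop := out = get_rank_by_points_alt total
instance (total : Int) (out : String × Option Int) : Decidable (Spec_get_rank_by_points total out) := by unfold Spec_get_rank_by_points; infer_instance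

-- ===== CLAIM (what is proved, stated in full; the proofs are below) =====
def Claim_equal_get_rank_by_points : Prop := ∀ (total : Int), Dom_get_rank_by_points total → Spec_get_rank_by_points total (get_rank_by_points total)

-- ===== LEMMAS AND PROOFS =====

-- ===== VERDICT (by name: the statement is the Claim_ definition above) =====
set_option maxHeartbeats 1000000 in
theorem get_rank_by_points_spec : Claim_equal_get_rank_by_points := by
  intro total _
  unfold Spec_get_rank_by_points get_rank_by_points get_rank_by_points_alt
  simp only [RANKS, THRESHOLDS, rankLoopA, nextThrLoopA, bisectRight, List.map, List.headD, List.getD, List.length]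
  by_cases h8 : (6000:Int) ≤ total
  · simp only [ge_iff_le, (show ((0:Int) ≤ total) = True from eq_true (by omega)), (show ((200:Int) ≤ total) = True from eq_true (by omega)), (show ((500:Int) ≤ total) = True from eq_true (by omega)), (show ((1000:Int) ≤ total) = True from eq_true (by omega)), (show ((1500:Int) ≤ total) = True from eq_true (by omega)), (show ((2200:Int) ≤ total) = True from eq_true (by omega)), (show ((3000:Int) ≤ total) = True from eq_true (by omega)), (show ((4500:Int) ≤ total) = True from eq_true (by omega)), (show ((6000:Int) ≤ total) = True from eq_true (by omega))]
    decide
  by_cases h7 : (4500:Int) ≤ total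
  · simp only [ge_iff_le, (show ((0:Int) ≤ total) = True from eq_true (by omega)), (show ((200:Int) ≤ total) = True from eq_true (by omega)), (show ((500:Int) ≤ total) = True from eq_true (by omega)), (show ((1000:Int) ≤ total) = True from eq_true (by omega)), (show ((1500:Int) ≤ total) = True from eq_true (by omega)), (show ((2200:Int) ≤ total) = True from eq_true (by omega)), (show ((3000:Int) ≤ total) = True from eq_true (by omega)), (show ((4500:Int) ≤ total) = True from eq_true (by omega)), (show ((6000:Int) ≤ total) = False from eq_false (by omega))]
    decide
  by_cases h6 : (3000:Int) ≤ total
  · simp only [ge_iff_le, (show ((0:Int) ≤ total) = True from eq_true (by omega)), (show ((200:Int) ≤ total) = True from eq_true (by omega)), (show ((500:Int) ≤ total) = True from eq_true (by omega)), (show ((1000:Int) ≤ total) = True from eq_true (by omega)), (show ((1500:Int) ≤ total) = True from eq_true (by omega)), (show ((2200:Int) ≤ total) = True from eq_true (by omega)), (show ((3000:Int) ≤ total) = True from eq_true (by omega)), (show ((4500:Int) ≤ total) = False from eq_false (by omega)), (show ((6000:Int) ≤ total) = False from eq_false (by omega))]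
    decide
  by_cases h5 : (2200:Int) ≤ total
  · simp only [ge_iff_le, (show ((0:Int) ≤ total) = True from eq_true (by omega)), (show ((200:Int) ≤ total) = True from eq_true (by omega)), (show ((500:Int) ≤ total) = True from eq_true (by omega)), (show ((1000:Int) ≤ total) = True from eq_true (by omega)), (show ((1500:Int) ≤ total) = True from eq_true (by omega)), (show ((2200:Int) ≤ total) = True from eq_true (by omega)), (show ((3000:Int) ≤ total) = False from eq_false (by omega)), (show ((4500:Int) ≤ total) = False from eq_false (by omega)), (show ((6000:Int) ≤ total) = False from eq_false (by omega))]
    decide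
  by_cases h4 : (1500:Int) ≤ total
  · simp only [ge_iff_le, (show ((0:Int) ≤ total) = True from eq_true (by omega)), (show ((200:Int) ≤ total) = True from eq_true (by omega)), (show ((500:Int) ≤ total) = True from eq_true (by omega)), (show ((1000:Int) ≤ total) = True from eq_true (by omega)), (show ((1500:Int) ≤ total) = True from eq_true (by omega)), (show ((2200:Int) ≤ total) = False from eq_false (by omega)), (show ((3000:Int) ≤ total) = False from eq_false (by omega)), (show ((4500:Int) ≤ total) = False from eq_false (by omega)), (show ((6000:Int) ≤ total) = False from eq_false (by omega))]
    decide
  by_cases h3 : (1000:Int) ≤ total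
  · simp only [ge_iff_le, (show ((0:Int) ≤ total) = True from eq_true (by omega)), (show ((200:Int) ≤ total) = True from eq_true (by omega)), (show ((500:Int) ≤ total) = True from eq_true (by omega)), (show ((1000:Int) ≤ total) = True from eq_true (by omega)), (show ((1500:Int) ≤ total) = False from eq_false (by omega)), (show ((2200:Int) ≤ total) = False from eq_false (by omega)), (show ((3000:Int) ≤ total) = False from eq_false (by omega)), (show ((4500:Int) ≤ total) = False from eq_false (by omega)), (show ((6000:Int) ≤ total) = False from eq_false (by omega))]
    decide
  by_cases h2 : (500:Int) ≤ total
  · simp only [ge_iff_le, (show ((0:Int) ≤ total) = True from eq_true (by omega)), (show ((200:Int) ≤ total) = True from eq_true (by omega)), (show ((500:Int) ≤ total) = True from eq_true (by omega)), (show ((1000:Int) ≤ total) = False from eq_false (by omega)), (show ((1500:Int) ≤ total) = False from eq_false (by omega)), (show ((2200:Int) ≤ total) = False from eq_false (by omega)), (show ((3000:Int) ≤ total) = False from eq_false (by omega)), (show ((4500:Int) ≤ total) = False from eq_false (by omega)), (show ((6000:Int) ≤ total) = False from eq_false (by omega))]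
    decide
  by_cases h1 : (200:Int) ≤ total
  · simp only [ge_iff_le, (show ((0:Int) ≤ total) = True from eq_true (by omega)), (show ((200:Int) ≤ total) = True from eq_true (by omega)), (show ((500:Int) ≤ total) = False from eq_false (by omega)), (show ((1000:Int) ≤ total) = False from eq_false (by omega)), (show ((1500:Int) ≤ total) = False from eq_false (by omega)), (show ((2200:Int) ≤ total) = False from eq_false (by omega)), (show ((3000:Int) ≤ total) = False from eq_false (by omega)), (show ((4500:Int) ≤ total) = False from eq_false (by omega)), (show ((6000:Int) ≤ total) = False from eq_false (by omega))]
    decide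
  by_cases h0 : (0:Int) ≤ total
  · simp only [ge_iff_le, (show ((0:Int) ≤ total) = True from eq_true (by omega)), (show ((200:Int) ≤ total) = False from eq_false (by omega)), (show ((500:Int) ≤ total) = False from eq_false (by omega)), (show ((1000:Int) ≤ total) = False from eq_false (by omega)), (show ((1500:Int) ≤ total) = False from eq_false (by omega)), (show ((2200:Int) ≤ total) = False from eq_false (by omega)), (show ((3000:Int) ≤ total) = False from eq_false (by omega)), (show ((4500:Int) ≤ total) = False from eq_false (by omega)), (show ((6000:Int) ≤ total) = False from eq_false (by omega))]
    decide
  simp only [ge_iff_le, (show ((0:Int) ≤ total) = False from eq_false (by omega)), (show ((200:Int) ≤ total) = False from eq_false (by omega)), (show ((500:Int) ≤ total) = False from eq_false (by omega)), (show ((1000:Int) ≤ total) = False from eq_false (by omega)), (show ((1500:Int) ≤ total) = False from eq_false (by omega)), (show ((2200:Int) ≤ total) = False from eq_false (by omega)), (show ((3000:Int) ≤ total) = False from eq_false (by omega)), (show ((4500:Int) ≤ total) = False from eq_false (by omega)), (show ((6000:Int) ≤ total) = False from eq_false (by omega))]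
  decide
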